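-- pv_equiv track=rewrite | github.com/pavlodef/bbb-scrapper | scrapper/parse.py | remove_dublicates
-- ===== SOURCE A (Python) =====
-- def remove_dublicates(results):
--     seen_urls = set()
--     unique_results = []
--
--     for item in results:
--         url = item.get("reportUrl")
--         if url not in seen_urls:
--             seen_urls.add(url)
--             unique_results.append(item)
--
--     return unique_results
-- ===== SOURCE B (Python) =====
-- def remove_dublicates(results):
--     urls = [item.get("reportUrl") for item in results]
--     return [item for i, item in enumerate(results)
--             if item.get("reportUrl") not in urls[:i]]
-- ===== Notes on version B (the rewrite author's own statement) =====
-- stated objective: alternative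
-- what changed: Replaces A's stateful single pass (seen-set plus growing output list) with a stateless staged formulation: precompute the url list, then keep item i iff its url does not occur among the earlier urls (a look-back membership over urls[:i]), trading A's O(n) state-carrying loop for an O(n^2) pure filter.
import Mathlib
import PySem

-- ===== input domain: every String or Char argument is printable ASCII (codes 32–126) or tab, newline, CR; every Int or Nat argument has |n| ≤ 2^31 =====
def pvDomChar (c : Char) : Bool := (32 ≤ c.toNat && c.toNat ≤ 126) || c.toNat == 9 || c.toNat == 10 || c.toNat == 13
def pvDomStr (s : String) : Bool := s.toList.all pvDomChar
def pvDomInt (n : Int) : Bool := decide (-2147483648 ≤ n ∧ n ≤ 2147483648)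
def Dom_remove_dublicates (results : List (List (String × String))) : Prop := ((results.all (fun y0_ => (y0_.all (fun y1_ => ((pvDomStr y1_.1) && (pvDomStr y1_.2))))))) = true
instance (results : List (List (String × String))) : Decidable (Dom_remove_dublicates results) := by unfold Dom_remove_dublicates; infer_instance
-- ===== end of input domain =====

-- B is a stateless staged formulation: precompute the url list, then keep item i iff its
-- url does not occur among the earlier urls (look-back over urls[:i]); no seen-set, no
-- accumulator (objective: alternative; B is O(n^2) where A is O(n)).

-- ===== PORT A =====
-- item.get("reportUrl") on the item dict (association list, first match)
def pvGetUrl (item : List (String × String)) : Option String :=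
  (PySem.Dict.mk item).get? "reportUrl"

def remove_dublicates (results : List (List (String × String))) : List (List (String × String)) :=
  (results.foldl
    (fun (st : PySem.Set (Option String) × List (List (String × String))) item =>
      let url := pvGetUrl item
      if PySem.Set.contains st.1 url then st
      else (PySem.Set.add st.1 url, st.2 ++ [item]))
    (PySem.Set.empty, [])).2

-- ===== PORT B =====
def remove_dublicates_alt (results : List (List (String × String))) : List (List (String × String)) :=
  let urls := results.map pvGetUrl
  ((PySem.List.enumerate results 0).filter
      (fun p => !((PySem.List.slice urls none (some p.1)).contains (pvGetUrl p.2)))).map (·.2)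

-- ===== PRECONDITION & SPEC =====
def Spec_remove_dublicates (results : List (List (String × String))) (out : List (List (String × String))) : Prop := out = remove_dublicates_alt results
instance (results : List (List (String × String))) (out : List (List (String × String))) : Decidable (Spec_remove_dublicates results out) := by unfold Spec_remove_dublicates; infer_instance

-- ===== CLAIM (what is proved, stated in full; the proofs are below) =====
def Claim_equal_remove_dublicates : Prop := ∀ (results : List (List (String × String))), Dom_remove_dublicates results → Spec_remove_dublicates results (remove_dublicates results)

-- ===== LEMMAS AND PROOFS =====

theorem pv_beq_eq (a b : Option String) : (a == b) = decide (b = a) := by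
  by_cases h : a = b
  · subst h; simp
  · simp [h, Ne.symm h]

-- A's loop over the remaining items, started after a prefix `pre` whose urls have the same
-- membership as the set `s`, produces `acc ++` B's filter over the remaining items
-- enumerated from `pre.length`, with the look-back slices taken in the FULL url list.
theorem pv_loop_eq (rest : List (List (String × String))) :
    ∀ (pre : List (List (String × String))) (s : PySem.Set (Option String))
      (acc : List (List (String × String))),
      (∀ u, PySem.Set.contains s u = (pre.map pvGetUrl).contains u) →
      (rest.foldl
        (fun (st : PySem.Set (Option String) × List (List (String × String))) item =>
          let url := pvGetUrl item
          if PySem.Set.contains st.1 url then st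
          else (PySem.Set.add st.1 url, st.2 ++ [item]))
        (s, acc)).2
      = acc ++ ((PySem.List.enumerate rest (pre.length : Int)).filter
          (fun p => !((PySem.List.slice ((pre ++ rest).map pvGetUrl) none (some p.1)).contains
              (pvGetUrl p.2)))).map (·.2) := by
  induction rest with
  | nil => intro pre s acc _; simp [PySem.List.enumerate]
  | cons item rs ih =>
      intro pre s acc hs
      rw [PySem.List.enumerate_cons, List.foldl_cons]
      have hslice : PySem.List.slice ((pre ++ item :: rs).map pvGetUrl) none (some (pre.length : Int))
          = pre.map pvGetUrl := by
        rw [PySem.List.slice_to_natCast]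
        simp
      have hcond : (!((PySem.List.slice ((pre ++ item :: rs).map pvGetUrl) none
            (some (pre.length : Int))).contains (pvGetUrl item)))
          = !(PySem.Set.contains s (pvGetUrl item)) := by
        rw [hslice, hs]
      have hfull : (pre ++ item :: rs) = (pre ++ [item]) ++ rs := by simp
      have hlen : ((pre ++ [item]).length : Int) = (pre.length : Int) + 1 := by
        simp
      by_cases h : PySem.Set.contains s (pvGetUrl item) = true
      · -- skipped: url already seen
        rw [List.filter_cons]
        simp only [hcond, h, Bool.not_true, if_neg (by simp : ¬ (false = true)), if_true]
        have hmem : pvGetUrl item ∈ pre.map pvGetUrl := by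
          have h2 := hs (pvGetUrl item)
          rw [h] at h2
          exact of_decide_eq_true (by rw [← List.contains_eq_mem]; exact h2.symm)
        have ih' := ih (pre ++ [item]) s acc (by
          intro u
          rw [hs]
          simp only [List.map_append, List.map_cons, List.map_nil, List.contains_eq_mem,
            decide_eq_decide, List.mem_append, List.mem_singleton]
          constructor
          · exact Or.inl
          · rintro (hu | rfl)
            · exact hu
            · exact hmem)
        rw [hlen] at ih'
        rw [← hfull] at ih'
        exact ih'
      · -- kept: new url
        rw [List.filter_cons]
        simp only [hcond, eq_false_of_ne_true h, Bool.not_false,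
          if_neg (by simp : ¬ (false = true)), if_true]
        have ih' := ih (pre ++ [item]) (PySem.Set.add s (pvGetUrl item)) (acc ++ [item]) (by
          intro u
          have hadd : PySem.Set.contains (PySem.Set.add s (pvGetUrl item)) u
              = (PySem.Set.contains s u || (pvGetUrl item == u)) := by
            simp only [PySem.Set.add, if_neg h]
            simp [PySem.Set.contains, pv_beq_eq]
          rw [hadd, hs, pv_beq_eq]
          simp only [List.map_append, List.map_cons, List.map_nil, List.contains_eq_mem,
            List.mem_append, List.mem_singleton, Bool.decide_or])
        rw [hlen] at ih'
        rw [← hfull] at ih'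
        rw [ih']
        simp

-- ===== VERDICT (by name: the statement is the Claim_ definition above) =====
theorem remove_dublicates_spec : Claim_equal_remove_dublicates := by
  intro results _
  unfold Spec_remove_dublicates remove_dublicates remove_dublicates_alt
  have h := pv_loop_eq results [] PySem.Set.empty [] (by
    intro u; simp [PySem.Set.contains, PySem.Set.empty])
  simpa using h
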